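-- pv_equiv track=rewrite | github.com/humancipher/Programming_Contest | Programming_Contest/AtCoder/other/sumitrust2019/sumitrust2019_E.py | col_count
-- ===== SOURCE A (Python) =====
-- def col_count(A,N,M):
--     col = [[0,0,0] for _ in range(N+1)]
--     for i in range(N):
--         for j in range(3):
--             col[i+1][j] = col[i][j]
--         for j in range(3):
--             if col[i][j] == A[i]:
--                 col[i+1][j] += 1
--                 break
--
--     output = 1
--     for i in range(N):
--         cnt = 0
--         for j in range(3):
--             if col[i][j] == A[i]:
--                 cnt += 1
--
--         output *= cnt
--         output %= M
--     return output
-- ===== SOURCE B (Python) =====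
-- def col_count(A, N, M):
--     c = [0, 0, 0]
--     out = 1
--     for i in range(N):
--         x = A[i]
--         cnt = c.count(x)
--         out = out * cnt % M
--         if cnt:
--             c[c.index(x)] += 1
--     return out
-- ===== Notes on version B (the rewrite author's own statement) =====
-- stated objective: simpler
-- what changed: Single fused pass with three scalar counters (count-then-increment via list.count/list.index) replaces the O(N) history table plus a separate second multiplication pass.
import Mathlib
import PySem

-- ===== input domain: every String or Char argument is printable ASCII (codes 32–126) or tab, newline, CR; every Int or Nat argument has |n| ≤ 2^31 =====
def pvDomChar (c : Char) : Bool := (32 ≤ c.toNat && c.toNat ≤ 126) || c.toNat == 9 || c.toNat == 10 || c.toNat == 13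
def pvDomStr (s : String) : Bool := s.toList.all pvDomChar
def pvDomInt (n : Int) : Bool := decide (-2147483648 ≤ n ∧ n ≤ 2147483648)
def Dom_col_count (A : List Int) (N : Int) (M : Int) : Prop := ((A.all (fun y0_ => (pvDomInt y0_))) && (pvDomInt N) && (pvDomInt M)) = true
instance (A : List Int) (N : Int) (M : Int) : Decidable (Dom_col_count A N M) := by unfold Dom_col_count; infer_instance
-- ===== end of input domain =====

-- B replaces A's O(N) history table and second pass by one fused pass over three scalar counters (count, multiply, then increment): simpler, O(1) space.

-- ===== PORT A =====
-- copy col[i] into col[i+1], then 'for j in range(3): if col[i][j]==A[i]: col[i+1][j]+=1; break'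
def pvCopyInc (c : Int × Int × Int) (a : Int) : Int × Int × Int :=
  if c.1 = a then (c.1 + 1, c.2.1, c.2.2)
  else if c.2.1 = a then (c.1, c.2.1 + 1, c.2.2)
  else if c.2.2 = a then (c.1, c.2.1, c.2.2 + 1)
  else c

-- 'cnt = 0; for j in range(3): if col[i][j]==A[i]: cnt += 1'
def pvCntA (c : Int × Int × Int) (a : Int) : Int :=
  ((0 : Int) + (if c.1 = a then 1 else 0)) + (if c.2.1 = a then 1 else 0)
    + (if c.2.2 = a then 1 else 0)

-- the table 'col' after the first loop (col[0] = [0,0,0]; A[i] total via getD, in range under Pre_)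
def pvColTable (A : List Int) : Nat → List (Int × Int × Int)
  | 0 => [(0, 0, 0)]
  | n + 1 =>
      let t := pvColTable A n
      t ++ [pvCopyInc (t.getLastD (0, 0, 0)) (A.getD n 0)]

def col_count (A : List Int) (N : Int) (M : Int) : Int :=
  let t := pvColTable A N.toNat
  (List.range N.toNat).foldl
    (fun out i => PySem.Int.mod (out * pvCntA (t.getD i (0, 0, 0)) (A.getD i 0)) M) 1

-- ===== PORT B =====
-- one loop body: cnt = c.count(x); out = out*cnt % M; if cnt: c[c.index(x)] += 1
def pvBStep (M : Int) (s : List Int × Int) (x : Int) : List Int × Int :=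
  let cnt : Int := (s.1.count x : Nat)
  let out := PySem.Int.mod (s.2 * cnt) M
  if cnt ≠ 0 then
    (match PySem.List.index? s.1 x with
     | some k => s.1.set k (s.1.getD k 0 + 1)
     | none => s.1, out)
  else (s.1, out)

def col_count_alt (A : List Int) (N : Int) (M : Int) : Int :=
  ((List.range N.toNat).foldl (fun s i => pvBStep M s (A.getD i 0)) ([0, 0, 0], 1)).2

-- ===== PRECONDITION & SPEC =====
-- Pre_ excludes exactly the inputs where A raises: IndexError when N > len(A), ZeroDivisionError when N > 0 and M = 0.
def Pre_col_count (A : List Int) (N : Int) (M : Int) : Prop :=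
  N ≤ (A.length : Int) ∧ (0 < N → M ≠ 0)
instance (A : List Int) (N : Int) (M : Int) : Decidable (Pre_col_count A N M) := by
  unfold Pre_col_count; infer_instance

def pvWitness_col_count : List Int × Int × Int := ([0, 1, 0], 3, 7)

def Spec_col_count (A : List Int) (N : Int) (M : Int) (out : Int) : Prop := out = col_count_alt A N M
instance (A : List Int) (N : Int) (M : Int) (out : Int) : Decidable (Spec_col_count A N M out) := by unfold Spec_col_count; infer_instance

-- ===== CLAIM (what is proved, stated in full; the proofs are below) =====
def Claim_equal_col_count : Prop := ∀ (A : List Int) (N : Int) (M : Int), Dom_col_count A N M → Pre_col_count A N M → Spec_col_count A N M (col_count A N M)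

-- ===== LEMMAS AND PROOFS =====

-- the counter triple after the first i loop iterations
def pvIter (A : List Int) : Nat → Int × Int × Int
  | 0 => (0, 0, 0)
  | n + 1 => pvCopyInc (pvIter A n) (A.getD n 0)

lemma pvColTable_eq (A : List Int) (n : Nat) :
    pvColTable A n = (List.range (n + 1)).map (pvIter A) := by
  induction n with
  | zero => simp [pvColTable, pvIter]
  | succ n ih =>
      rw [pvColTable, ih]
      rw [show n + 1 + 1 = (n + 1) + 1 from rfl, List.range_succ (n := n + 1)]
      rw [List.range_succ (n := n)]
      simp [pvIter]

def pvRep (c : Int × Int × Int) : List Int := [c.1, c.2.1, c.2.2]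

lemma pvCount_rep (c : Int × Int × Int) (x : Int) :
    ((pvRep c).count x : Int) = pvCntA c x := by
  rcases c with ⟨a, b, d⟩
  simp only [pvRep, pvCntA, List.count_cons, List.count_nil, beq_iff_eq]
  by_cases h1 : a = x <;> by_cases h2 : b = x <;> by_cases h3 : d = x <;>
    simp [h1, h2, h3]

lemma pvBStep_rep (M : Int) (o : Int) (c : Int × Int × Int) (x : Int) :
    pvBStep M (pvRep c, o) x = (pvRep (pvCopyInc c x), PySem.Int.mod (o * pvCntA c x) M) := by
  rcases c with ⟨a, b, d⟩
  simp only [pvBStep, pvCount_rep]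
  by_cases h1 : a = x <;> by_cases h2 : b = x <;> by_cases h3 : d = x <;>
    simp [pvRep, pvCopyInc, pvCntA, PySem.List.index?, List.idxOf?, List.findIdx?_cons,
      h1, h2, h3]

lemma pvFold_eq (A : List Int) (M : Int) (n : Nat) :
    (List.range n).foldl (fun s i => pvBStep M s (A.getD i 0)) ([0, 0, 0], 1)
      = (pvRep (pvIter A n),
         (List.range n).foldl
           (fun out i => PySem.Int.mod (out * pvCntA (pvIter A i) (A.getD i 0)) M) 1) := by
  induction n with
  | zero => simp [pvIter, pvRep]
  | succ n ih =>
      rw [List.range_succ, List.foldl_append, List.foldl_append, ih]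
      simp [pvBStep_rep, pvIter]

lemma pvTable_getD (A : List Int) (n i : Nat) (h : i < n + 1) :
    (pvColTable A n).getD i (0, 0, 0) = pvIter A i := by
  rw [pvColTable_eq]
  rw [List.getD_eq_getElem?_getD]
  simp [h]

-- ===== VERDICT (by name: the statement is the Claim_ definition above) =====
theorem col_count_spec : Claim_equal_col_count := by
  intro A N M _ _
  show col_count A N M = col_count_alt A N M
  unfold col_count col_count_alt
  rw [pvFold_eq]
  dsimp only
  symm
  refine PySem.List.foldl_congr_mem _ _ _ _ ?_
  intro acc i hi
  rw [pvTable_getD A N.toNat i (by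
    have := List.mem_range.mp hi; omega)]
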